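-- pv_equiv track=rewrite | github.com/Slyf14/Security-Insider-Lab-I-Lab5 | Fingerprint_construction/puf_fingerprint_generation.py | fingerprint_to_hex
-- ===== SOURCE A (Python) =====
-- def fingerprint_to_hex(fingerprint, num_bytes=64):
--     hex_str = ""
--     for i in range(0, min(len(fingerprint), num_bytes * 8), 8):
--         byte = 0
--         for j in range(8):
--             if i + j < len(fingerprint):
--                 byte = (byte << 1) | fingerprint[i + j]
--         hex_str += f"{byte:02X} "
--         if (i // 8 + 1) % 16 == 0:
--             hex_str += "\n"
--     return hex_str.strip()
-- ===== SOURCE B (Python) =====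
-- def fingerprint_to_hex(fingerprint, num_bytes=64):
--     # pass 1: pack bits into a flat byte table
--     table = []
--     for i in range(0, min(len(fingerprint), num_bytes * 8), 8):
--         byte = 0
--         for j in range(8):
--             if i + j < len(fingerprint):
--                 byte = (byte << 1) | fingerprint[i + j]
--         table.append(byte)
--     # pass 2: chunk into rows of 16 and format
--     rows = [table[k:k + 16] for k in range(0, len(table), 16)]
--     lines = [' '.join(f'{b:02X}' for b in row) + ' ' for row in rows]
--     return '\n'.join(lines).strip()
-- ===== Notes on version B (the rewrite author's own statement) =====
-- stated objective: alternative
-- what changed: Instead of one loop that accumulates a single string and decides in-loop when to insert a newline, B first builds a flat list of packed byte values and then formats it in a second pass by chunking into rows of 16 and joining with ' '/'\n'.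
import Mathlib
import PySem

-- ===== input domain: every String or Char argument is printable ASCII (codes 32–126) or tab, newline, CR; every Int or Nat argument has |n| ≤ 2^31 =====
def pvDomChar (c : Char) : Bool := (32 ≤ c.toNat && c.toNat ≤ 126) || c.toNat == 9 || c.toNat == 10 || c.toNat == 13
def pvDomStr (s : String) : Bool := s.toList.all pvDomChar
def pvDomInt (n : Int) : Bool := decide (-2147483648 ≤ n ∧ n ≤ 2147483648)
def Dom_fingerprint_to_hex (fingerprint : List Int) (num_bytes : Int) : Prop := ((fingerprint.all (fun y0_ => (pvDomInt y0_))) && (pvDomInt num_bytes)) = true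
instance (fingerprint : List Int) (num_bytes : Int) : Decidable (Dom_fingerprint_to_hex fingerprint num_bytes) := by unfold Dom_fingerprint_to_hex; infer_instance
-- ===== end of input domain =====

-- B builds the flat byte table in one pass and then formats it row-by-row with joins,
-- instead of A's single loop accumulating one string with an in-loop newline counter
-- (objective: alternative decomposition; same cost).

-- ===== PORT A =====

-- shared by both ports: Python's f"{n:02X}" (uppercase hex, zero-padded to width 2, sign in front)
def pvHexChar (n : Nat) : Char := if n < 10 then Char.ofNat (48 + n) else Char.ofNat (55 + n)

def pvHexAux : Nat → List Char → List Char
  | 0, acc => acc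
  | (n+1), acc => pvHexAux ((n+1) / 16) (pvHexChar ((n+1) % 16) :: acc)
decreasing_by exact Nat.div_lt_self (Nat.succ_pos n) (by omega)

def pvFmt02X (n : Int) : List Char :=
  if n < 0 then '-' :: pvHexAux n.natAbs []
  else if n = 0 then ['0', '0']
  else
    let ds := pvHexAux n.toNat []
    if ds.length < 2 then '0' :: ds else ds

-- shared by both ports: the identical inner 8-bit packing loop of A and B
def pvByte (fingerprint : List Int) (i : Int) : Int :=
  (PySem.List.pyRange 0 8 1).foldl
    (fun byte j =>
      if i + j < PySem.List.len fingerprint then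
        PySem.Int.bor (byte <<< (1 : Nat)) ((PySem.List.pyGet? fingerprint (i + j)).getD 0)
      else byte) 0

def fingerprint_to_hex (fingerprint : List Int) (num_bytes : Int) : String :=
  let hex_str : List Char :=
    (PySem.List.pyRange 0 (min (PySem.List.len fingerprint) (num_bytes * 8)) 8).foldl
      (fun hex_str i =>
        let byte := pvByte fingerprint i
        let hex_str := hex_str ++ pvFmt02X byte ++ [' ']
        if PySem.Int.mod (PySem.Int.floordiv i 8 + 1) 16 = 0 then hex_str ++ ['\n'] else hex_str)
      []
  String.ofList (PySem.Chars.strip hex_str)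

-- ===== PORT B =====

-- ' '.join(f'{b:02X}' for b in row) + ' '
def pvRowLine (row : List Int) : List Char :=
  PySem.Chars.join [' '] (row.map pvFmt02X) ++ [' ']

def fingerprint_to_hex_alt (fingerprint : List Int) (num_bytes : Int) : String :=
  let table :=
    (PySem.List.pyRange 0 (min (PySem.List.len fingerprint) (num_bytes * 8)) 8).map
      (pvByte fingerprint)
  let rows :=
    (PySem.List.pyRange 0 (PySem.List.len table) 16).map
      (fun k => PySem.List.slice table (some k) (some (k + 16)))
  let lines := rows.map pvRowLine
  String.ofList (PySem.Chars.strip (PySem.Chars.join ['\n'] lines))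

-- ===== PRECONDITION & SPEC =====
def Spec_fingerprint_to_hex (fingerprint : List Int) (num_bytes : Int) (out : String) : Prop := out = fingerprint_to_hex_alt fingerprint num_bytes
instance (fingerprint : List Int) (num_bytes : Int) (out : String) : Decidable (Spec_fingerprint_to_hex fingerprint num_bytes out) := by unfold Spec_fingerprint_to_hex; infer_instance

-- ===== CLAIM (what is proved, stated in full; the proofs are below) =====
def Claim_equal_fingerprint_to_hex : Prop := ∀ (fingerprint : List Int) (num_bytes : Int), Dom_fingerprint_to_hex fingerprint num_bytes → Spec_fingerprint_to_hex fingerprint num_bytes (fingerprint_to_hex fingerprint num_bytes)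

-- ===== LEMMAS AND PROOFS =====

-- A's hex string as a function of the byte list (t = 0-based byte position)
def pvATail : Nat → List Int → List Char
  | _, [] => []
  | t, b :: bs =>
      pvFmt02X b ++ [' '] ++
        (if (t + 1) % 16 = 0 then '\n' :: pvATail (t + 1) bs else pvATail (t + 1) bs)

-- proof-side chunking of the byte list into rows of 16
def pvChunk16 (bs : List Int) : List (List Int) :=
  if h : bs = [] then [] else bs.take 16 :: pvChunk16 (bs.drop 16)
termination_by bs.length
decreasing_by
  have := List.length_pos_of_ne_nil h
  simp only [List.length_drop]; omega

theorem pvATail_append (bs : List Int) (b : Int) :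
    ∀ t, pvATail t (bs ++ [b]) =
      pvATail t bs ++ pvFmt02X b ++ [' '] ++
        (if (t + bs.length + 1) % 16 = 0 then ['\n'] else []) := by
  induction bs with
  | nil =>
      intro t
      by_cases h : (t + 1) % 16 = 0 <;>
        simp [pvATail, h]
  | cons c cs ih =>
      intro t
      have harith : t + 1 + cs.length + 1 = t + (c :: cs).length + 1 := by
        simp; omega
      simp only [List.cons_append, pvATail, ih (t + 1), harith]
      by_cases h : (t + 1) % 16 = 0 <;> simp [h]

theorem pvRow_lemma (r : Nat) :
    ∀ (bs : List Int) (t : Nat), 0 < r → r ≤ 16 → (t + r) % 16 = 0 → bs ≠ [] →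
      pvATail t bs =
        PySem.Chars.join [' '] ((bs.take r).map pvFmt02X) ++ [' '] ++
          (if r ≤ bs.length then '\n' :: pvATail (t + r) (bs.drop r) else []) := by
  induction r with
  | zero => omega
  | succ r ih =>
      intro bs t _ hr16 hmod hbs
      match bs with
      | [] => exact absurd rfl hbs
      | b :: bs' =>
        by_cases hr : r = 0
        · subst hr
          have h1 : (t + 1) % 16 = 0 := hmod
          simp [pvATail, h1, PySem.Chars.join_singleton]
        · have hne : (t + 1) % 16 ≠ 0 := by omega
          match bs' with
          | [] =>
              have hle : ¬ (r + 1 ≤ ([b] : List Int).length) := by simp; omega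
              simp [pvATail, hne, hle, PySem.Chars.join_singleton, List.take_succ_cons] <;> omega
          | b' :: bs'' =>
              have hIH := ih (b' :: bs'') (t + 1) (Nat.pos_of_ne_zero hr) (by omega)
                (by omega) (by simp)
              conv_lhs => rw [pvATail]
              rw [if_neg hne, hIH]
              rw [List.take_succ_cons, List.map_cons]
              have htake : (List.take r (b' :: bs'')).map pvFmt02X ≠ [] := by
                match r, hr with
                | (m+1), _ => simp [List.take_succ_cons]
              obtain ⟨p, ps, hps⟩ := List.exists_cons_of_ne_nil htake
              rw [hps, PySem.Chars.join_cons_cons, ← hps, List.drop_succ_cons]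
              have h1 : t + 1 + r = t + (r + 1) := by omega
              rw [h1]
              by_cases hc : r ≤ (b' :: bs'').length
              · rw [if_pos hc, if_pos (by simp at hc ⊢; omega)]
                simp [List.append_assoc]
              · rw [if_neg hc, if_neg (by simp at hc ⊢; omega)]
                simp [List.append_assoc]

theorem pvATail_eq_chunks :
    ∀ (n : Nat) (bs : List Int) (t : Nat), bs.length ≤ n → t % 16 = 0 →
      pvATail t bs =
        PySem.Chars.join ['\n'] ((pvChunk16 bs).map pvRowLine) ++
          (if bs ≠ [] ∧ bs.length % 16 = 0 then ['\n'] else []) := by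
  intro n
  induction n with
  | zero =>
      intro bs t hlen _
      have : bs = [] := List.length_eq_zero_iff.mp (by omega)
      subst this
      simp [pvATail, pvChunk16, PySem.Chars.join_nil]
  | succ n ih =>
      intro bs t hlen ht
      match bs with
      | [] => simp [pvATail, pvChunk16, PySem.Chars.join_nil]
      | b :: bs' =>
        have hb : (b :: bs') ≠ [] := by simp
        rw [pvRow_lemma 16 (b :: bs') t (by omega) (le_refl _) (by omega) hb]
        rw [pvChunk16]
        simp only [hb, dif_neg, reduceCtorEq, not_false_eq_true]
        by_cases hlt : 16 ≤ (b :: bs').length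
        · have hdroplen : ((b :: bs').drop 16).length ≤ n := by
            simp only [List.length_drop]; simp at hlen ⊢; omega
          rw [if_pos hlt, ih _ (t + 16) hdroplen (by omega)]
          by_cases hdrop : (b :: bs').drop 16 = []
          · have h16 : (b :: bs').length = 16 := by
              have h := List.length_drop (l := (b :: bs')) (i := 16)
              rw [hdrop] at h
              simp at h hlt ⊢; omega
            rw [hdrop]
            simp [pvChunk16, PySem.Chars.join_singleton, pvRowLine, pvATail, h16]
          · have hch : pvChunk16 ((b :: bs').drop 16) ≠ [] := by
              rw [pvChunk16]
              split
              · exact absurd ‹_› hdrop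
              · simp
            obtain ⟨q, qs, hqs⟩ := List.exists_cons_of_ne_nil hch
            have hmod : (b :: bs').length % 16 = ((b :: bs').drop 16).length % 16 := by
              rw [List.length_drop]
              simp only [List.length_cons] at hlt ⊢
              omega
            rw [List.map_cons, hqs, List.map_cons, PySem.Chars.join_cons_cons, ← List.map_cons,
              ← hqs]
            simp only [hmod, hdrop, ne_eq, not_false_eq_true, true_and, pvRowLine]
            simp [List.append_assoc]
        · have hnm : ¬ ((bs'.length + 1) % 16 = 0) := by
            simp only [List.length_cons] at hlt; omega
          have hdrop : (b :: bs').drop 16 = [] := by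
            apply List.drop_eq_nil_of_le; omega
          rw [if_neg hlt, hdrop]
          simp [pvChunk16, PySem.Chars.join_singleton, pvRowLine, hnm]

theorem pvStrip_newline (x : List Char) :
    PySem.Chars.strip (x ++ ['\n']) = PySem.Chars.strip x := by
  unfold PySem.Chars.strip PySem.Chars.lstrip PySem.Chars.rstrip
  rw [List.dropWhile_append]
  by_cases h : (List.dropWhile PySem.Chars.isspace x).isEmpty = true
  · rw [if_pos h, List.isEmpty_iff.mp h]
    rfl
  · rw [if_neg h, List.reverse_append]
    have hnl : PySem.Chars.isspace '\n' = true := by decide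
    simp [List.dropWhile_cons, hnl]

-- A's newline test, on the k-th byte
theorem pvCond (k : Nat) :
    (PySem.Int.mod (PySem.Int.floordiv (0 + 8 * (k:Int)) 8 + 1) 16 = 0) ↔ ((k + 1) % 16 = 0) := by
  simp only [PySem.Int.mod, PySem.Int.floordiv, zero_add]
  rw [Int.mul_fdiv_cancel_left _ (by norm_num), Int.fmod_eq_emod]
  simp
  omega

-- A's fold over the byte positions, as pvATail of the byte list
theorem pvFoldA (fp : List Int) :
    ∀ (n : Nat) (acc : List Char),
      List.foldl (fun hex_str (k : Nat) =>
          let byte := pvByte fp (0 + 8 * (k:Int))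
          let hex_str := hex_str ++ pvFmt02X byte ++ [' ']
          if PySem.Int.mod (PySem.Int.floordiv (0 + 8 * (k:Int)) 8 + 1) 16 = 0
          then hex_str ++ ['\n'] else hex_str)
        acc (List.range n)
      = acc ++ pvATail 0 ((List.range n).map (fun (k : Nat) => pvByte fp (0 + 8 * (k:Int)))) := by
  intro n
  induction n with
  | zero => intro acc; simp [pvATail]
  | succ n ih =>
      intro acc
      rw [List.range_succ, List.foldl_append, ih, List.map_append, List.map_cons, List.map_nil,
        pvATail_append]
      simp only [List.foldl_cons, List.foldl_nil, List.length_map, List.length_range]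
      by_cases h : (n + 1) % 16 = 0
      · rw [if_pos ((pvCond n).mpr (by omega)), if_pos (by omega)]
        simp [List.append_assoc]
      · rw [if_neg (fun hx => h ((pvCond n).mp hx)), if_neg (by omega)]
        simp [List.append_assoc]

-- B's row comprehension builds exactly the 16-chunks
theorem pvChunkMap :
    ∀ (n : Nat) (bs : List Int), bs.length ≤ n →
      (List.range ((bs.length + 15) / 16)).map (fun j => (bs.drop (16 * j)).take 16)
        = pvChunk16 bs := by
  intro n
  induction n with
  | zero =>
      intro bs hlen
      have : bs = [] := List.length_eq_zero_iff.mp (by omega)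
      subst this
      simp [pvChunk16]
  | succ n ih =>
      intro bs hlen
      match bs with
      | [] => simp [pvChunk16]
      | b :: bs' =>
        have hpos : 0 < (b :: bs').length := by simp
        have hm : ((b :: bs').length + 15) / 16 = (((b :: bs').drop 16).length + 15) / 16 + 1 := by
          rw [List.length_drop]; simp at hpos ⊢; omega
        rw [hm, List.range_succ_eq_map, List.map_cons, List.map_map]
        rw [pvChunk16]
        simp only [reduceCtorEq, not_false_eq_true, dif_neg]
        refine List.cons_eq_cons.mpr ⟨by simp, ?_⟩
        have hlen' : ((b :: bs').drop 16).length ≤ n := by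
          simp only [List.length_drop, List.length_cons]
          simp only [List.length_cons] at hlen
          omega
        rw [← ih ((b :: bs').drop 16) hlen']
        apply List.map_congr_left
        intro j _
        simp only [Function.comp_apply, List.drop_drop]
        congr 2
        omega

-- ===== VERDICT (by name: the statement is the Claim_ definition above) =====
theorem fingerprint_to_hex_spec : Claim_equal_fingerprint_to_hex := by
  intro fp nb _
  unfold Spec_fingerprint_to_hex fingerprint_to_hex fingerprint_to_hex_alt
  rw [PySem.List.pyRange_of_pos 0 (min (PySem.List.len fp) (nb * 8)) (by norm_num)]
  rw [List.foldl_map, List.map_map]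
  simp only [Function.comp_def]
  rw [pvFoldA fp _ [], List.nil_append]
  simp only [PySem.List.len_eq, List.length_map, List.length_range]
  rw [PySem.List.pyRange_of_pos 0 _ (by norm_num : (0:Int) < 16)]
  generalize (if 0 < min ((fp.length : Int)) (nb * 8) then ((min ((fp.length : Int)) (nb * 8) - 0 + 8 - 1) / 8).toNat else 0) = N
  rw [show (if (0:Int) < (N:Int) then (((N:Int) - 0 + 16 - 1) / 16).toNat else 0) = (N + 15) / 16 from by split <;> omega]
  generalize hbs : List.map (fun (k : Nat) => pvByte fp (0 + 8 * (k:Int))) (List.range N) = bs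
  have hlen : bs.length = N := by rw [← hbs]; simp
  rw [List.map_map, List.map_map]
  simp only [Function.comp_def]
  have hsl : ∀ j ∈ List.range ((N + 15) / 16),
      pvRowLine (PySem.List.slice bs (some (0 + 16 * (j:Int))) (some (0 + 16 * (j:Int) + 16)))
        = pvRowLine ((bs.drop (16 * j)).take 16) := by
    intro j _
    have h1 : (0 + 16 * (j:Int)) = ((16 * j : Nat) : Int) := by push_cast; ring
    have h2 : (0 + 16 * (j:Int) + 16) = ((16 * j : Nat) : Int) + ((16 : Nat) : Int) := by push_cast; ring
    rw [h2, h1, PySem.List.slice_natCast_add]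
  rw [List.map_congr_left hsl]
  have hchunks : List.map (fun j : Nat => pvRowLine ((bs.drop (16 * j)).take 16))
      (List.range ((N + 15) / 16)) = List.map pvRowLine (pvChunk16 bs) := by
    conv_rhs => rw [← pvChunkMap bs.length bs le_rfl]
    rw [List.map_map, hlen]
    simp only [Function.comp_def]
  rw [hchunks]
  rw [pvATail_eq_chunks bs.length bs 0 le_rfl (Nat.zero_mod 16)]
  by_cases hc : bs ≠ [] ∧ bs.length % 16 = 0
  · rw [if_pos hc, pvStrip_newline]
  · rw [if_neg hc, List.append_nil]
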